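-- pv_equiv track=rewrite | github.com/ralitabi/Conversational-AI-Agent | backend/handlers/council_tax_band_handler.py | _match_selected_address
-- ===== SOURCE A (Python) =====
-- from typing import Any, Dict, List, Optional
--
-- def _match_selected_address(
--
--     user_input: str,
--     addresses: List[Dict[str, Any]],
-- ) -> Optional[Dict[str, Any]]:
--     raw = user_input.strip()
--     lowered = raw.lower()
--
--     if raw.isdigit():
--         index = int(raw) - 1
--         if 0 <= index < len(addresses):
--             return addresses[index]
--
--     for address in addresses:
--         label = str(address.get("label", "")).strip()
--         if label.lower() == lowered:
--             return address
--
--     for address in addresses: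
--         address_id = str(address.get("id", "")).strip().lower()
--         if address_id and address_id == lowered:
--             return address
--
--     for address in addresses:
--         label = str(address.get("label", "")).strip().lower()
--         if lowered and lowered in label:
--             return address
--
--     return None
-- ===== SOURCE B (Python) =====
-- from typing import Any, Dict, List, Optional
--
-- def _match_selected_address(
--     user_input: str,
--     addresses: List[Dict[str, Any]],
-- ) -> Optional[Dict[str, Any]]:
--     raw = user_input.strip()
--     lowered = raw.lower()
--
--     if raw.isdigit():
--         index = int(raw) - 1
--         if 0 <= index < len(addresses):
--             return addresses[index]
--
--     label_match: Optional[Dict[str, Any]] = None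
--     id_match: Optional[Dict[str, Any]] = None
--     sub_match: Optional[Dict[str, Any]] = None
--     for address in addresses:
--         label = str(address.get("label", "")).strip().lower()
--         address_id = str(address.get("id", "")).strip().lower()
--         if label_match is None and label == lowered:
--             label_match = address
--         if id_match is None and address_id and address_id == lowered:
--             id_match = address
--         if sub_match is None and lowered and lowered in label:
--             sub_match = address
--
--     if label_match is not None:
--         return label_match
--     if id_match is not None:
--         return id_match
--     return sub_match
-- ===== Notes on version B (the rewrite author's own statement) =====
-- stated objective: alternative
-- what changed: B replaces A's three separate passes over the address list (exact-label, id, substring tiers) with a single pass that records the first hit of each tier in three Optional accumulators and then returns by tier priority.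
import Mathlib
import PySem

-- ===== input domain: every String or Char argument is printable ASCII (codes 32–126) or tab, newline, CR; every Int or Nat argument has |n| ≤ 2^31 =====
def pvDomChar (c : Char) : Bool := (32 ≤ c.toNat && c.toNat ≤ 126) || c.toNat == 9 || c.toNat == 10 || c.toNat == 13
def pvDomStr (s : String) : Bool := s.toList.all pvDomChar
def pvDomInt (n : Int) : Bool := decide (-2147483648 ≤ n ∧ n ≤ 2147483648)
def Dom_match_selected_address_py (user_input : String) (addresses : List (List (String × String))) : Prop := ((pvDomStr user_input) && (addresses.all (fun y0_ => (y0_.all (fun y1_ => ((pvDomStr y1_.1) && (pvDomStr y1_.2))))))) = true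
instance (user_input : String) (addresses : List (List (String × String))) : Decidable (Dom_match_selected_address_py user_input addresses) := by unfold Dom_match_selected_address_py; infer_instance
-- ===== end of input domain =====

-- B merges A's three scans over the address list into ONE pass that records the first
-- match of each tier (exact label / id / substring) and picks by priority afterwards
-- (objective: alternative decomposition, one traversal instead of up to three).

-- ===== PORT A =====
-- str(address.get(k, "")) : values are strings already, get defaults to ""
def pvGet (a : List (String × String)) (k : String) : String :=
  PySem.Dict.getD (PySem.Dict.mk a) k ""

-- first for-loop of A: exact label match
def pvLoopLabel (lowered : String) : List (List (String × String)) → Option (List (String × String))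
  | [] => none
  | a :: rest =>
    if PySem.Str.lower (PySem.Str.strip (pvGet a "label")) = lowered then some a
    else pvLoopLabel lowered rest

-- second for-loop of A: non-empty id match
def pvLoopId (lowered : String) : List (List (String × String)) → Option (List (String × String))
  | [] => none
  | a :: rest =>
    let address_id := PySem.Str.lower (PySem.Str.strip (pvGet a "id"))
    if address_id ≠ "" ∧ address_id = lowered then some a
    else pvLoopId lowered rest

-- third for-loop of A: substring match
def pvLoopSub (lowered : String) : List (List (String × String)) → Option (List (String × String))
  | [] => none
  | a :: rest =>
    let label := PySem.Str.lower (PySem.Str.strip (pvGet a "label"))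
    if lowered ≠ "" ∧ PySem.Str.isIn lowered label then some a
    else pvLoopSub lowered rest

def match_selected_address_py (user_input : String) (addresses : List (List (String × String))) : Option (List (String × String)) :=
  let raw := PySem.Str.strip user_input
  let lowered := PySem.Str.lower raw
  let fromIndex : Option (List (String × String)) :=
    if PySem.Str.strIsdigit raw then
      -- int(raw): raw.isdigit() guarantees int() succeeds, so the getD default is never used
      let index := (PySem.Int.ofStr? raw).getD 0 - 1
      if 0 ≤ index ∧ index < (addresses.length : Int) then
        some (PySem.List.pyGetD addresses index [])  -- in range: addresses[index]
      else none
    else none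
  match fromIndex with
  | some a => some a
  | none =>
    match pvLoopLabel lowered addresses with
    | some a => some a
    | none =>
      match pvLoopId lowered addresses with
      | some a => some a
      | none => pvLoopSub lowered addresses

-- ===== PORT B =====
-- the single loop of B: three first-hit accumulators (label_match, id_match, sub_match)
def pvScan (lowered : String) (addresses : List (List (String × String))) :
    Option (List (String × String)) × Option (List (String × String)) × Option (List (String × String)) :=
  addresses.foldl (fun acc a =>
      let label := PySem.Str.lower (PySem.Str.strip (pvGet a "label"))
      let address_id := PySem.Str.lower (PySem.Str.strip (pvGet a "id"))
      ((if acc.1 = none ∧ label = lowered then some a else acc.1),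
       (if acc.2.1 = none ∧ address_id ≠ "" ∧ address_id = lowered then some a else acc.2.1),
       (if acc.2.2 = none ∧ lowered ≠ "" ∧ PySem.Str.isIn lowered label then some a else acc.2.2)))
    (none, none, none)

def match_selected_address_py_alt (user_input : String) (addresses : List (List (String × String))) : Option (List (String × String)) :=
  let raw := PySem.Str.strip user_input
  let lowered := PySem.Str.lower raw
  let fromIndex : Option (List (String × String)) :=
    if PySem.Str.strIsdigit raw then
      let index := (PySem.Int.ofStr? raw).getD 0 - 1
      if 0 ≤ index ∧ index < (addresses.length : Int) then
        some (PySem.List.pyGetD addresses index [])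
      else none
    else none
  match fromIndex with
  | some a => some a
  | none =>
    let r := pvScan lowered addresses
    match r.1 with
    | some a => some a
    | none =>
      match r.2.1 with
      | some a => some a
      | none => r.2.2

-- ===== PRECONDITION & SPEC =====
def Spec_match_selected_address_py (user_input : String) (addresses : List (List (String × String))) (out : Option (List (String × String))) : Prop := out = match_selected_address_py_alt user_input addresses
instance (user_input : String) (addresses : List (List (String × String))) (out : Option (List (String × String))) : Decidable (Spec_match_selected_address_py user_input addresses out) := by unfold Spec_match_selected_address_py; infer_instance

-- ===== CLAIM (what is proved, stated in full; the proofs are below) =====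
def Claim_equal_match_selected_address_py : Prop := ∀ (user_input : String) (addresses : List (List (String × String))), Dom_match_selected_address_py user_input addresses → Spec_match_selected_address_py user_input addresses (match_selected_address_py user_input addresses)

-- ===== LEMMAS AND PROOFS =====
-- first-some choice, used to state what the fold computes
def pvOr {α : Type} : Option α → Option α → Option α
  | some a, _ => some a
  | none, x => x

theorem pvOr_step {α : Type} (o : Option α) (a : α) (c : Prop) [Decidable c] (r : Option α) :
    pvOr (if o = none ∧ c then some a else o) r = pvOr o (if c then some a else r) := by
  cases o with
  | some x => simp [pvOr]
  | none => by_cases h : c <;> simp [pvOr, h]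

theorem pvScan_go (lowered : String) (addresses : List (List (String × String)))
    (l i s : Option (List (String × String))) :
    addresses.foldl (fun acc a =>
      let label := PySem.Str.lower (PySem.Str.strip (pvGet a "label"))
      let address_id := PySem.Str.lower (PySem.Str.strip (pvGet a "id"))
      ((if acc.1 = none ∧ label = lowered then some a else acc.1),
       (if acc.2.1 = none ∧ address_id ≠ "" ∧ address_id = lowered then some a else acc.2.1),
       (if acc.2.2 = none ∧ lowered ≠ "" ∧ PySem.Str.isIn lowered label then some a else acc.2.2)))
      (l, i, s)
    = (pvOr l (pvLoopLabel lowered addresses),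
       pvOr i (pvLoopId lowered addresses),
       pvOr s (pvLoopSub lowered addresses)) := by
  induction addresses generalizing l i s with
  | nil => cases l <;> cases i <;> cases s <;> simp [pvOr, pvLoopLabel, pvLoopId, pvLoopSub]
  | cons a rest ih =>
    rw [List.foldl_cons, ih]
    show (_, _, _) = (_, _, _)
    simp only [pvLoopLabel, pvLoopId, pvLoopSub]
    exact congrArg₂ Prod.mk (pvOr_step _ _ _ _)
      (congrArg₂ Prod.mk (pvOr_step _ _ _ _) (pvOr_step _ _ _ _))

theorem pvScan_eq (lowered : String) (addresses : List (List (String × String))) :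
    pvScan lowered addresses
    = (pvLoopLabel lowered addresses, pvLoopId lowered addresses, pvLoopSub lowered addresses) := by
  unfold pvScan
  rw [pvScan_go]
  rfl

-- ===== VERDICT (by name: the statement is the Claim_ definition above) =====
theorem match_selected_address_py_spec : Claim_equal_match_selected_address_py := by
  intro user_input addresses _
  unfold Spec_match_selected_address_py
  unfold match_selected_address_py match_selected_address_py_alt
  simp only [pvScan_eq]
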